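-- pv_equiv track=rewrite | github.com/MrBrantCode/unitest_baseline | mut_generate/mist_train_taco/taco_18415/solution.py | min_removals_to_good_sequence
-- ===== SOURCE A (Python) =====
-- def min_removals_to_good_sequence(arr):
--     from collections import defaultdict
--
--     # Initialize a dictionary to count occurrences of each element
--     hm = defaultdict(int)
--
--     # Count the occurrences of each element in the array
--     for num in arr:
--         hm[num] += 1
--
--     # Initialize the answer with the total number of elements
--     ans = len(arr)
--
--     # Calculate the minimum number of removals required
--     for num in hm:
--         if hm[num] != num:
--             if hm[num] > num:
--                 ans -= hm[num] - num
--             else: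
--                 ans -= hm[num]
--
--     # The result is the total number of elements minus the remaining good elements
--     return len(arr) - ans
-- ===== SOURCE B (Python) =====
-- def min_removals_to_good_sequence(arr):
--     # Sort once, then close each run of equal values in a single pass.
--     s = sorted(arr)
--     total = 0
--     i, n = 0, len(s)
--     while i < n:
--         num = s[i]
--         j = i + 1
--         while j < n and s[j] == num:
--             j += 1
--         cnt = j - i
--         if cnt > num:
--             total += cnt - num
--         elif cnt < num:
--             total += cnt
--         i = j
--     return total
-- ===== Notes on version B (the rewrite author's own statement) =====
-- stated objective: alternative
-- what changed: Replaces A's defaultdict frequency count plus the len-ans subtraction algebra with a sort-then-single-pass over runs of equal values that accumulates the removals directly.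
import Mathlib
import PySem

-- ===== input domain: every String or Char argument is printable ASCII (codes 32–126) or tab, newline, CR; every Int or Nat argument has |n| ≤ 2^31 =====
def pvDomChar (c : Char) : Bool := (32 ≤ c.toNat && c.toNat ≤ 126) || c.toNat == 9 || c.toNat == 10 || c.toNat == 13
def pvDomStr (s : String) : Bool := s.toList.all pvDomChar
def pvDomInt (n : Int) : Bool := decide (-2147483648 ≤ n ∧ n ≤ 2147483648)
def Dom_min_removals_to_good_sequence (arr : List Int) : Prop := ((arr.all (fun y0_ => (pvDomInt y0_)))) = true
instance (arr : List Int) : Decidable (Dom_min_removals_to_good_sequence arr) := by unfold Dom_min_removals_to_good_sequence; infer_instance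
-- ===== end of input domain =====

-- B replaces A's hash-count-then-subtract algebra by sort-then-group-runs in one pass (alternative decomposition, same result).

-- ===== PORT A =====
def min_removals_to_good_sequence (arr : List Int) : Int :=
  -- hm = defaultdict(int); for num in arr: hm[num] += 1
  let hm : PySem.Dict Int Int := arr.foldl (fun d num => d.modify num 0 (· + 1)) PySem.Dict.empty
  -- ans = len(arr); for num in hm: …
  let ans : Int := hm.keys.foldl (fun ans num =>
      if hm.getD num 0 ≠ num then
        if hm.getD num 0 > num then ans - (hm.getD num 0 - num) else ans - hm.getD num 0
      else ans) (arr.length : Int)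
  (arr.length : Int) - ans

-- ===== PORT B =====
-- Source B's outer while-loop processes one run of equal values per iteration (the inner
-- while advances j over the run); ported as run recursion: takeWhile = the inner while,
-- dropWhile = 'i = j'.
def pvGroupRuns : List Int → Int
  | [] => 0
  | num :: t =>
      let cnt : Int := 1 + ((t.takeWhile (fun y => y == num)).length : Int)
      (if cnt > num then cnt - num else if cnt < num then cnt else 0)
        + pvGroupRuns (t.dropWhile (fun y => y == num))
termination_by l => l.length
decreasing_by
  simpa using Nat.lt_succ_of_le (List.length_dropWhile_le _ _)

def min_removals_to_good_sequence_alt (arr : List Int) : Int :=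
  pvGroupRuns (PySem.List.sorted arr (fun x => x) false)

-- ===== PRECONDITION & SPEC =====
def Spec_min_removals_to_good_sequence (arr : List Int) (out : Int) : Prop := out = min_removals_to_good_sequence_alt arr
instance (arr : List Int) (out : Int) : Decidable (Spec_min_removals_to_good_sequence arr out) := by unfold Spec_min_removals_to_good_sequence; infer_instance

-- ===== CLAIM (what is proved, stated in full; the proofs are below) =====
def Claim_equal_min_removals_to_good_sequence : Prop := ∀ (arr : List Int), Dom_min_removals_to_good_sequence arr → Spec_min_removals_to_good_sequence arr (min_removals_to_good_sequence arr)

-- ===== LEMMAS AND PROOFS =====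

-- the per-value contribution both programs compute: removals for a value `num` occurring `cnt` times
def pvG (num cnt : Int) : Int := if cnt > num then cnt - num else if cnt < num then cnt else 0

-- A as a sum over the distinct values
theorem pv_foldl_sub (l : List Int) (g : Int → Int) (a : Int) :
    l.foldl (fun acc v => acc - g v) a = a - (l.map g).sum := by
  induction l generalizing a with
  | nil => simp
  | cons x t ih => simp [List.foldl_cons, ih]; ring

theorem pvA_eq_sum (arr : List Int) :
    min_removals_to_good_sequence arr
      = ((PySem.Set.ofList arr).map (fun v => pvG v (arr.count v))).sum := by
  unfold min_removals_to_good_sequence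
  have hc : arr.foldl (fun d num => d.modify num 0 (· + 1)) PySem.Dict.empty
      = PySem.Dict.counter arr := (PySem.Dict.counter_eq_foldl arr).symm
  rw [hc]
  simp only [PySem.Dict.keys_counter, PySem.Dict.getD_counter]
  rw [PySem.List.foldl_congr_mem _ _ (fun acc v => acc - pvG v (arr.count v))
      _ (by
        intro acc x hx
        simp only [pvG]
        split_ifs <;> omega)]
  rw [pv_foldl_sub]
  ring

-- in a ≤-sorted list the head's value does not reappear after its run
theorem pv_not_mem_dropWhile (num : Int) (t : List Int)
    (hp : List.Pairwise (· ≤ ·) (num :: t)) :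
    num ∉ t.dropWhile (fun y => y == num) := by
  intro hmem
  rcases hd : t.dropWhile (fun y => y == num) with _ | ⟨b, r⟩
  · simp [hd] at hmem
  · have hb : ((fun y => y == num) b) = false := by
      have h1 := List.head?_dropWhile_not (fun y => y == num) t
      rw [hd] at h1; exact h1
    have hbt : b ∈ t := (List.dropWhile_sublist _).subset (by rw [hd]; exact List.mem_cons_self)
    have hnb : num ≤ b := (List.pairwise_cons.1 hp).1 b hbt
    have hlt : num < b := lt_of_le_of_ne hnb (fun h => by
      rw [← h] at hb; simp at hb)
    have hsub : (t.dropWhile (fun y => y == num)).Pairwise (· ≤ ·) :=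
      List.Pairwise.sublist (List.dropWhile_sublist _) (List.pairwise_cons.1 hp).2
    rw [hd] at hsub hmem
    rcases List.mem_cons.1 hmem with h | h
    · omega
    · have := (List.pairwise_cons.1 hsub).1 num h; omega

-- B's run recursion as a sum over the distinct values, for sorted input
theorem pvB_eq_sum (s : List Int) (hp : List.Pairwise (· ≤ ·) s) :
    pvGroupRuns s = ((PySem.Set.ofList s).map (fun v => pvG v (s.count v))).sum := by
  induction s using pvGroupRuns.induct with
  | case1 => simp [pvGroupRuns]
  | case2 num t ih =>
    simp only [pvGroupRuns]
    set w := t.takeWhile (fun y => y == num) with hw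
    set r := t.dropWhile (fun y => y == num) with hr
    have htw : w ++ r = t := List.takeWhile_append_dropWhile
    have hwall : ∀ y ∈ w, y = num := by
      intro y hy
      have := List.mem_takeWhile_imp hy
      simpa using this
    have hnr : num ∉ r := pv_not_mem_dropWhile num t hp
    have hpr : r.Pairwise (· ≤ ·) :=
      List.Pairwise.sublist (List.dropWhile_sublist _) (List.pairwise_cons.1 hp).2
    -- count of the head value
    have hcountw : w.count num = w.length := by
      rw [List.count_eq_length]; intro b hb; exact ((hwall b hb).symm : num = b)
    have hcountr : r.count num = 0 := List.count_eq_zero.2 hnr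
    have hcnum : (num :: t).count num = 1 + w.length := by
      rw [← htw]
      simp [List.count_append, hcountw, hcountr]
      omega
    -- counts of other values
    have hcother : ∀ v ∈ r, (num :: t).count v = r.count v := by
      intro v hv
      have hvne : v ≠ num := fun h => hnr (h ▸ hv)
      have hcw : w.count v = 0 := List.count_eq_zero.2 (fun hvw => hvne (hwall v hvw))
      rw [← htw]
      simp [List.count_cons, List.count_append, hcw]
      omega
    -- distinct values of s, up to permutation
    have hperm : (PySem.Set.ofList (num :: t)).Perm (num :: PySem.Set.ofList r) := by
      rw [List.perm_ext_iff_of_nodup (PySem.Set.nodup_ofList _)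
        (by
          refine List.nodup_cons.2 ⟨?_, PySem.Set.nodup_ofList _⟩
          rw [PySem.Set.mem_ofList]; exact hnr)]
      intro a
      rw [PySem.Set.mem_ofList, List.mem_cons, List.mem_cons, PySem.Set.mem_ofList, ← htw,
        List.mem_append]
      constructor
      · rintro (h | h | h)
        · exact Or.inl h
        · exact Or.inl (hwall a h)
        · exact Or.inr h
      · rintro (h | h)
        · exact Or.inl h
        · exact Or.inr (Or.inr h)
    rw [(hperm.map (fun v => pvG v ((num :: t).count v))).sum_eq]
    rw [List.map_cons, List.sum_cons]
    rw [List.map_congr_left (f := fun v => pvG v (((num :: t).count v : Int)))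
      (g := fun v => pvG v ((r.count v : Int)))
      (by
        intro v hv
        show pvG v (((num :: t).count v : Int)) = pvG v ((r.count v : Int))
        rw [hcother v ((PySem.Set.mem_ofList r v).1 hv)])]
    rw [← ih hpr, hcnum]
    simp only [pvG]
    push_cast
    split_ifs <;> omega

-- ===== VERDICT (by name: the statement is the Claim_ definition above) =====
theorem min_removals_to_good_sequence_spec : Claim_equal_min_removals_to_good_sequence := by
  intro arr _
  show min_removals_to_good_sequence arr = min_removals_to_good_sequence_alt arr
  unfold min_removals_to_good_sequence_alt
  set s := PySem.List.sorted arr (fun x => x) false with hs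
  have hperm : s.Perm arr := PySem.List.sorted_perm arr (fun x => x) false
  have hsort : s.Pairwise (· ≤ ·) := by
    simpa using PySem.List.sorted_pairwise arr (fun x => x)
  rw [pvA_eq_sum, pvB_eq_sum s hsort]
  have hcount : ∀ v : Int, s.count v = arr.count v := fun v => hperm.count_eq v
  have hkeys : (PySem.Set.ofList s).Perm (PySem.Set.ofList arr) := by
    rw [List.perm_ext_iff_of_nodup (PySem.Set.nodup_ofList _) (PySem.Set.nodup_ofList _)]
    intro a
    rw [PySem.Set.mem_ofList, PySem.Set.mem_ofList]
    exact hperm.mem_iff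
  rw [show (fun v => pvG v (s.count v)) = (fun v => pvG v (arr.count v)) from
    funext (fun v => by rw [hcount v])]
  exact ((hkeys.map (fun v => pvG v (arr.count v))).sum_eq).symm
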